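-- pv_equiv track=rewrite | github.com/ramkicr7/Genesys_Ramkishore | genesys test.py | max_distinct_rectangle
-- ===== SOURCE A (Python) =====
-- def max_distinct_rectangle(m, n, k, c):
--     max_area = 0
--     for r1 in range(m):
--         for r2 in range(r1, m):
--             color_count = {}
--             c1 = 0
--
--             for c2 in range(n):
--                 for r in range(r1, r2 + 1):
--                     color = c[r][c2]
--                     if color in color_count:
--                         color_count[color] += 1
--                     else:
--                         color_count[color] = 1
--
--                 while len(color_count) > k:
--                     for r in range(r1, r2 + 1):
--                         color = c[r][c1]
--                         color_count[color] -= 1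
--                         if color_count[color] == 0:
--                             del color_count[color]
--                     c1 += 1
--
--                 current_area = (r2 - r1 + 1) * (c2 - c1 + 1)
--                 max_area = max(max_area, current_area)
--
--     return max_area
-- ===== SOURCE B (Python) =====
-- def max_distinct_rectangle(m, n, k, c):
--     max_area = 0
--     for r1 in range(m):
--         for r2 in range(r1, m):
--             height = r2 - r1 + 1
--             for c1 in range(n):
--                 colors = set()
--                 for c2 in range(c1, n):
--                     for r in range(r1, r2 + 1):
--                         colors.add(c[r][c2])
--                     if len(colors) <= k:
--                         max_area = max(max_area, height * (c2 - c1 + 1))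
--     return max_area
-- ===== Notes on version B (the rewrite author's own statement) =====
-- stated objective: simpler
-- what changed: The two-pointer sliding column window with a mutable color-count dict (add column, shrink-from-the-left while over k distinct, delete-on-zero) is replaced by a direct enumeration of all column windows per row pair, growing a plain set of colors left-to-right and recording the area whenever the distinct count is within k.
import Mathlib
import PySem

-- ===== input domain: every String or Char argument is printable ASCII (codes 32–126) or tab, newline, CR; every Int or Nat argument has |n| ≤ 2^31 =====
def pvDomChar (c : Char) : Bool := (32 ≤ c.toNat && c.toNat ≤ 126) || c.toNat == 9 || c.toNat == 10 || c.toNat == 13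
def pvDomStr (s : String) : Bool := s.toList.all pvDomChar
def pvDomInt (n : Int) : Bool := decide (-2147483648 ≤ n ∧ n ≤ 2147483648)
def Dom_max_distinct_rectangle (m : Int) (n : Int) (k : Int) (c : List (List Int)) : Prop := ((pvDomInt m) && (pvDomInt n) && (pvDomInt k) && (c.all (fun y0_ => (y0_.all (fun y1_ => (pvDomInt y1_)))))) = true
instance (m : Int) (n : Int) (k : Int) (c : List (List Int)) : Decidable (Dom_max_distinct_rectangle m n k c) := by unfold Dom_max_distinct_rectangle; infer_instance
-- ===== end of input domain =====

-- B replaces A's sliding column window (count-dict added/shrunk in place) by a plain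
-- brute-force scan of all column windows per row pair with a growing color set: simpler, not faster.

-- ===== PORT A =====
-- c[r][j] (in range whenever Pre_ holds; out of range Python raises, excluded by Pre_)
def pvGetD2 (c : List (List Int)) (r j : Int) : Int :=
  PySem.List.pyGetD (PySem.List.pyGetD c r []) j 0

-- 'if color in color_count: color_count[color] += 1 else: color_count[color] = 1'
def pvAddOne (d : PySem.Dict Int Int) (color : Int) : PySem.Dict Int Int :=
  if d.contains color then d.modify color 0 (· + 1) else d.insert color 1

-- 'for r in range(r1, r2 + 1): …' adding column c2
def pvAddCol (c : List (List Int)) (r1 r2 j : Int) (d : PySem.Dict Int Int) : PySem.Dict Int Int :=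
  (PySem.List.pyRange r1 (r2 + 1)).foldl (fun d r => pvAddOne d (pvGetD2 c r j)) d

-- 'color_count[color] -= 1; if color_count[color] == 0: del color_count[color]'
-- (modify with default 0 is exact whenever the key is present, which Pre_ guarantees)
def pvDecOne (d : PySem.Dict Int Int) (color : Int) : PySem.Dict Int Int :=
  let d1 := d.modify color 0 (· - 1)
  if d1.getD color 0 = 0 then d1.erase color else d1

def pvRemoveCol (c : List (List Int)) (r1 r2 j : Int) (d : PySem.Dict Int Int) : PySem.Dict Int Int :=
  (PySem.List.pyRange r1 (r2 + 1)).foldl (fun d r => pvDecOne d (pvGetD2 c r j)) d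

-- 'while len(color_count) > k: <remove column c1>; c1 += 1'.  The guard c1 ≤ c2 is a
-- totality guard only: under Pre_ (k ≥ 0) the dict is empty once c1 = c2 + 1, so the
-- while-condition already fails there; in Python k < 0 raises, excluded by Pre_.
def pvShrink (c : List (List Int)) (r1 r2 k c2 : Int) (d : PySem.Dict Int Int) (c1 : Int) :
    PySem.Dict Int Int × Int :=
  if h : k < (d.size : Int) ∧ c1 ≤ c2 then
    pvShrink c r1 r2 k c2 (pvRemoveCol c r1 r2 c1 d) (c1 + 1)
  else (d, c1)
termination_by (c2 + 1 - c1).toNat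
decreasing_by omega

-- body of A's 'for c2 in range(n)' loop; state = (color_count, c1, max_area)
def pvStepA (c : List (List Int)) (r1 r2 k : Int) (st : PySem.Dict Int Int × Int × Int)
    (c2 : Int) : PySem.Dict Int Int × Int × Int :=
  let d := pvAddCol c r1 r2 c2 st.1
  let p := pvShrink c r1 r2 k c2 d st.2.1
  (p.1, p.2, max st.2.2 ((r2 - r1 + 1) * (c2 - p.2 + 1)))

def max_distinct_rectangle (m : Int) (n : Int) (k : Int) (c : List (List Int)) : Int :=
  (PySem.List.pyRange 0 m).foldl (fun max_area r1 =>
    (PySem.List.pyRange r1 m).foldl (fun max_area r2 =>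
      ((PySem.List.pyRange 0 n).foldl (pvStepA c r1 r2 k)
        (PySem.Dict.empty, 0, max_area)).2.2) max_area) 0

-- ===== PORT B =====
-- 'for r in range(r1, r2 + 1): colors.add(c[r][c2])'
def pvColSet (c : List (List Int)) (r1 r2 j : Int) (s : PySem.Set Int) : PySem.Set Int :=
  (PySem.List.pyRange r1 (r2 + 1)).foldl (fun s r => PySem.Set.add s (pvGetD2 c r j)) s

-- body of B's 'for c2 in range(c1, n)' loop; state = (colors, max_area)
def pvStepB (c : List (List Int)) (r1 r2 k c1 : Int) (st : PySem.Set Int × Int)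
    (c2 : Int) : PySem.Set Int × Int :=
  let s := pvColSet c r1 r2 c2 st.1
  (s, if PySem.Set.len s ≤ k then max st.2 ((r2 - r1 + 1) * (c2 - c1 + 1)) else st.2)

def max_distinct_rectangle_alt (m : Int) (n : Int) (k : Int) (c : List (List Int)) : Int :=
  (PySem.List.pyRange 0 m).foldl (fun max_area r1 =>
    (PySem.List.pyRange r1 m).foldl (fun max_area r2 =>
      (PySem.List.pyRange 0 n).foldl (fun max_area c1 =>
        ((PySem.List.pyRange c1 n).foldl (pvStepB c r1 r2 k c1)
          (PySem.Set.empty, max_area)).2) max_area) max_area) 0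

-- ===== PRECONDITION & SPEC =====
-- Exactly the inputs where Python A returns: an empty loop range (m ≤ 0 or n ≤ 0), or a
-- grid whose first m rows have at least n entries (else IndexError) with k ≥ 0 (for k < 0
-- the shrink loop pops past the window: IndexError/KeyError).
def Pre_max_distinct_rectangle (m : Int) (n : Int) (k : Int) (c : List (List Int)) : Prop :=
  m ≤ 0 ∨ n ≤ 0 ∨
    (0 ≤ k ∧ m ≤ (c.length : Int) ∧ ∀ row ∈ c.take m.toNat, n ≤ (row.length : Int))
instance (m : Int) (n : Int) (k : Int) (c : List (List Int)) : Decidable (Pre_max_distinct_rectangle m n k c) := by unfold Pre_max_distinct_rectangle; infer_instance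
def pvWitness_max_distinct_rectangle : Int × Int × Int × List (List Int) := (2, 2, 1, [[1, 1], [1, 2]])

def Spec_max_distinct_rectangle (m : Int) (n : Int) (k : Int) (c : List (List Int)) (out : Int) : Prop := out = max_distinct_rectangle_alt m n k c
instance (m : Int) (n : Int) (k : Int) (c : List (List Int)) (out : Int) : Decidable (Spec_max_distinct_rectangle m n k c out) := by unfold Spec_max_distinct_rectangle; infer_instance

-- ===== CLAIM (what is proved, stated in full; the proofs are below) =====
def Claim_equal_max_distinct_rectangle : Prop := ∀ (m : Int) (n : Int) (k : Int) (c : List (List Int)), Dom_max_distinct_rectangle m n k c → Pre_max_distinct_rectangle m n k c → Spec_max_distinct_rectangle m n k c (max_distinct_rectangle m n k c)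

-- ===== LEMMAS AND PROOFS =====

-- ---- the mathematical objects both loops are about ----
-- colors of column j, rows r1..r2
def pvCol (c : List (List Int)) (r1 r2 j : Int) : List Int :=
  (PySem.List.pyRange r1 (r2 + 1)).map (fun r => pvGetD2 c r j)

-- colors of the rectangle rows r1..r2, columns l..u-1 (column-major concatenation)
def pvRect (c : List (List Int)) (r1 r2 l u : Int) : List Int :=
  (PySem.List.pyRange l u).flatMap (pvCol c r1 r2)

-- number of distinct colors of that rectangle
def pvD (c : List (List Int)) (r1 r2 l u : Int) : Int :=
  ((PySem.Set.ofList (pvRect c r1 r2 l u)).length : Int)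

-- feasible column window [l, j] for the fixed row pair
def pvFeas (c : List (List Int)) (r1 r2 n k l j : Int) : Prop :=
  0 ≤ l ∧ l ≤ j ∧ j + 1 ≤ n ∧ pvD c r1 r2 l (j + 1) ≤ k

-- A's dict represents the multiset of colors of a list L
def pvDInv (d : PySem.Dict Int Int) (L : List Int) : Prop :=
  d.keys.Nodup ∧ ∀ v : Int, d.get? v = if L.count v = 0 then none else some ((L.count v : Int))

-- ---- rectangle decomposition ----
theorem pvRect_nil (c : List (List Int)) (r1 r2 l u : Int) (h : u ≤ l) :
    pvRect c r1 r2 l u = [] := by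
  simp [pvRect, PySem.List.pyRange_one_eq_nil h]

theorem pvRect_succ (c : List (List Int)) (r1 r2 l u : Int) (h : l ≤ u) :
    pvRect c r1 r2 l (u + 1) = pvRect c r1 r2 l u ++ pvCol c r1 r2 u := by
  simp [pvRect, PySem.List.pyRange_one_succ_right h]

theorem pvRect_cons (c : List (List Int)) (r1 r2 l u : Int) (h : l < u) :
    pvRect c r1 r2 l u = pvCol c r1 r2 l ++ pvRect c r1 r2 (l + 1) u := by
  simp [pvRect, PySem.List.pyRange_one_cons h]

-- ---- distinct-count monotonicity ----
theorem pvLen_le_add (s : PySem.Set Int) (x : Int) : s.length ≤ (PySem.Set.add s x).length := by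
  simp only [PySem.Set.add]
  split <;> simp

theorem pvLen_le_update (s : PySem.Set Int) (ys : List Int) :
    s.length ≤ (PySem.Set.update s ys).length := by
  rw [PySem.Set.update_eq_foldl]
  induction ys generalizing s with
  | nil => simp
  | cons y ys ih => exact le_trans (pvLen_le_add s y) (by simpa using ih (PySem.Set.add s y))

theorem pvD_mono (c : List (List Int)) (r1 r2 l u : Int) (h : l ≤ u) :
    pvD c r1 r2 l u ≤ pvD c r1 r2 l (u + 1) := by
  unfold pvD
  rw [pvRect_succ c r1 r2 l u h, PySem.Set.ofList_append]
  exact_mod_cast pvLen_le_update _ _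

-- ---- dict invariant: empty, add, remove, size ----
theorem pvDInv_empty : pvDInv PySem.Dict.empty [] := by
  refine ⟨by simp [PySem.Dict.keys, PySem.Dict.empty], fun v => by simp [PySem.Dict.get?_empty]⟩

theorem pvAddOne_eq (d : PySem.Dict Int Int) (x : Int) :
    pvAddOne d x = d.insert x (d.getD x 0 + 1) := by
  unfold pvAddOne
  by_cases h : d.contains x
  · simp [h]; rfl
  · simp [h, PySem.Dict.getD_of_not_contains d 0 (by simpa using h)]

theorem pvDInv_addOne (d : PySem.Dict Int Int) (L : List Int) (x : Int) (h : pvDInv d L) :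
    pvDInv (pvAddOne d x) (L ++ [x]) := by
  obtain ⟨hnd, hget⟩ := h
  rw [pvAddOne_eq]
  refine ⟨PySem.Dict.nodup_keys_insert d x _ hnd, ?_⟩
  intro v
  rw [PySem.Dict.get?_insert]
  by_cases hvx : v = x
  · subst hvx
    have : d.getD v 0 = (L.count v : Int) := by
      rw [PySem.Dict.getD_eq_get?_getD, hget v]
      split <;> simp_all
    simp [this, List.count_append]
  · have hxv : ¬ x = v := fun h' => hvx h'.symm
    simp [hvx, hget v, List.count_append, hxv]

theorem pv_get?_erase_self (d : PySem.Dict Int Int) (x : Int) : (d.erase x).get? x = none := by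
  simp [PySem.Dict.erase, PySem.Dict.get?, List.find?_eq_none]

theorem pv_find?_filter (l : List (Int × Int)) (x v : Int) (h : v ≠ x) :
    (l.filter (fun p => !(p.1 == x))).find? (fun p => p.1 == v) = l.find? (fun p => p.1 == v) := by
  induction l with
  | nil => rfl
  | cons p ps ih =>
    by_cases hv : p.1 = v
    · have hx : (p.1 == x) = false := by simp [hv]; exact h
      simp [hv, h]
    · by_cases hx : p.1 = x
      · have hxv : (x == v) = false := by simp; exact fun hh => h hh.symm
        simp [hx, ih, hxv]
      · simp [hx, hv, ih]

theorem pv_get?_erase_of_ne (d : PySem.Dict Int Int) (x v : Int) (h : v ≠ x) :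
    (d.erase x).get? v = d.get? v := by
  simp only [PySem.Dict.erase, PySem.Dict.get?]
  rw [pv_find?_filter _ _ _ h]

theorem pv_nodup_keys_erase (d : PySem.Dict Int Int) (x : Int) (h : d.keys.Nodup) :
    (d.erase x).keys.Nodup := by
  simp only [PySem.Dict.erase, PySem.Dict.keys] at *
  exact h.sublist (List.Sublist.map _ List.filter_sublist)

theorem pvDInv_decOne (d : PySem.Dict Int Int) (x : Int) (R : List Int)
    (h : pvDInv d (x :: R)) : pvDInv (pvDecOne d x) R := by
  obtain ⟨hnd, hget⟩ := h
  have hx : d.getD x 0 = ((R.count x : Int)) + 1 := by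
    rw [PySem.Dict.getD_eq_get?_getD, hget x]
    simp
  have hmod : d.modify x 0 (· - 1) = d.insert x ((R.count x : Int)) := by
    show d.insert x (d.getD x 0 - 1) = _
    rw [hx]; ring_nf
  unfold pvDecOne
  simp only [hmod]
  have hgd : (d.insert x ((R.count x : Int))).getD x 0 = (R.count x : Int) := by
    simp [PySem.Dict.getD_eq_get?_getD, PySem.Dict.get?_insert_self]
  rw [hgd]
  by_cases hz : (R.count x : Int) = 0
  · rw [if_pos hz]
    refine ⟨pv_nodup_keys_erase _ _ (PySem.Dict.nodup_keys_insert d x _ hnd), ?_⟩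
    intro v
    by_cases hvx : v = x
    · subst hvx
      rw [pv_get?_erase_self]
      have : R.count v = 0 := by exact_mod_cast hz
      simp [this]
    · rw [pv_get?_erase_of_ne _ _ _ hvx, PySem.Dict.get?_insert, if_neg hvx, hget v]
      have hxv : ¬ x = v := fun h' => hvx h'.symm
      simp [hxv]
  · rw [if_neg hz]
    refine ⟨PySem.Dict.nodup_keys_insert d x _ hnd, ?_⟩
    intro v
    rw [PySem.Dict.get?_insert]
    by_cases hvx : v = x
    · subst hvx
      have : R.count v ≠ 0 := by exact_mod_cast hz
      simp [this]
    · rw [if_neg hvx, hget v]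
      have hxv : ¬ x = v := fun h' => hvx h'.symm
      simp [hxv]

theorem pvDInv_addList (xs : List Int) : ∀ (d : PySem.Dict Int Int) (L : List Int),
    pvDInv d L → pvDInv (xs.foldl pvAddOne d) (L ++ xs) := by
  induction xs with
  | nil => intro d L h; simpa using h
  | cons x xs ih =>
    intro d L h
    have := ih (pvAddOne d x) (L ++ [x]) (pvDInv_addOne d L x h)
    simpa using this

theorem pvDInv_decList (xs : List Int) : ∀ (d : PySem.Dict Int Int) (R : List Int),
    pvDInv d (xs ++ R) → pvDInv (xs.foldl pvDecOne d) R := by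
  induction xs with
  | nil => intro d R h; simpa using h
  | cons x xs ih =>
    intro d R h
    exact ih (pvDecOne d x) R (pvDInv_decOne d x (xs ++ R) (by simpa using h))

theorem pvDInv_size (d : PySem.Dict Int Int) (L : List Int) (h : pvDInv d L) :
    d.size = (PySem.Set.ofList L).length := by
  obtain ⟨hnd, hget⟩ := h
  have hmem : ∀ v, v ∈ d.keys ↔ v ∈ PySem.Set.ofList L := by
    intro v
    rw [← PySem.Dict.contains_iff_mem_keys, PySem.Set.mem_ofList,
        PySem.Dict.contains_eq_isSome_get?, hget v]
    constructor
    · intro hv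
      by_contra hm
      have : L.count v = 0 := by
        simp [List.count_eq_zero]; exact hm
      simp [this] at hv
    · intro hm
      have : 0 < L.count v := List.count_pos_iff.mpr hm
      simp [Nat.pos_iff_ne_zero.mp this]
  have hperm : d.keys.Perm (PySem.Set.ofList L) :=
    (List.perm_ext_iff_of_nodup hnd (PySem.Set.nodup_ofList L)).mpr hmem
  have : d.keys.length = (PySem.Set.ofList L).length := hperm.length_eq
  simpa [PySem.Dict.keys, PySem.Dict.size] using this

-- ---- relating the ports' column operations to pvCol ----
theorem pvAddCol_eq (c : List (List Int)) (r1 r2 j : Int) (d : PySem.Dict Int Int) :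
    pvAddCol c r1 r2 j d = (pvCol c r1 r2 j).foldl pvAddOne d := by
  simp [pvAddCol, pvCol, List.foldl_map]

theorem pvRemoveCol_eq (c : List (List Int)) (r1 r2 j : Int) (d : PySem.Dict Int Int) :
    pvRemoveCol c r1 r2 j d = (pvCol c r1 r2 j).foldl pvDecOne d := by
  simp [pvRemoveCol, pvCol, List.foldl_map]

theorem pvColSet_eq (c : List (List Int)) (r1 r2 j : Int) (s : PySem.Set Int) :
    pvColSet c r1 r2 j s = PySem.Set.update s (pvCol c r1 r2 j) := by
  simp [pvColSet, pvCol, PySem.Set.update_eq_foldl, List.foldl_map]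

-- ---- generic fold helpers ----
theorem pvFoldl_ge (f : Int → Int → Int) : ∀ (L : List Int) (b : Int),
    (∀ b x, x ∈ L → b ≤ f b x) → b ≤ L.foldl f b := by
  intro L
  induction L with
  | nil => simp
  | cons x L ih =>
    intro b h
    simp only [List.foldl_cons]
    exact le_trans (h b x (by simp)) (ih (f b x) (fun b y hy => h b y (by simp [hy])))

theorem pvFoldl_mem_or (Q : Int → Prop) (f : Int → Int → Int) : ∀ (L : List Int) (b : Int),
    (∀ b x, x ∈ L → f b x = b ∨ Q (f b x)) → (L.foldl f b = b ∨ Q (L.foldl f b)) := by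
  intro L
  induction L with
  | nil => simp
  | cons x L ih =>
    intro b h
    simp only [List.foldl_cons]
    rcases ih (f b x) (fun b y hy => h b y (by simp [hy])) with h1 | h1
    · rw [h1]; exact h b x (by simp)
    · exact Or.inr h1

theorem pvFoldl_reach (f : Int → Int → Int) (L : List Int) (x : Int) (v b : Int)
    (hx : x ∈ L) (hmono : ∀ b y, y ∈ L → b ≤ f b y) (hv : ∀ b, v ≤ f b x) :
    v ≤ L.foldl f b := by
  obtain ⟨L1, L2, rfl⟩ := List.append_of_mem hx
  rw [List.foldl_append, List.foldl_cons]
  exact le_trans (hv _)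
    (pvFoldl_ge f L2 _ (fun b y hy => hmono b y (by simp [hy])))

theorem pvFoldl_congr_inv {α : Type} (P : Int → Prop) (f g : Int → α → Int) :
    ∀ (L : List α) (b : Int), P b →
    (∀ b x, x ∈ L → P b → f b x = g b x ∧ P (f b x)) →
    L.foldl f b = L.foldl g b ∧ P (L.foldl f b) := by
  intro L
  induction L with
  | nil => intro b hb _; exact ⟨rfl, hb⟩
  | cons x L ih =>
    intro b hb h
    obtain ⟨he, hp⟩ := h b x (by simp) hb
    simp only [List.foldl_cons]
    rw [← he]
    exact ih (f b x) hp (fun b y hy hpb => h b y (by simp [hy]) hpb)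

-- ---- A's shrink loop ----
theorem pvShrink_spec (c : List (List Int)) (r1 r2 k c2 : Int) :
    ∀ (c1 : Int) (d : PySem.Dict Int Int), 0 ≤ c1 → c1 ≤ c2 + 1 →
    pvDInv d (pvRect c r1 r2 c1 (c2 + 1)) →
    (∀ l, 0 ≤ l → l < c1 → k < pvD c r1 r2 l (c2 + 1)) →
    0 ≤ (pvShrink c r1 r2 k c2 d c1).2 ∧
    (pvShrink c r1 r2 k c2 d c1).2 ≤ c2 + 1 ∧
    pvDInv (pvShrink c r1 r2 k c2 d c1).1
      (pvRect c r1 r2 (pvShrink c r1 r2 k c2 d c1).2 (c2 + 1)) ∧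
    (∀ l, 0 ≤ l → l < (pvShrink c r1 r2 k c2 d c1).2 → k < pvD c r1 r2 l (c2 + 1)) ∧
    (((pvShrink c r1 r2 k c2 d c1).1.size : Int) ≤ k ∨ (pvShrink c r1 r2 k c2 d c1).2 = c2 + 1) := by
  have main : ∀ (fuel : Nat) (c1 : Int) (d : PySem.Dict Int Int),
      (c2 + 1 - c1).toNat ≤ fuel → 0 ≤ c1 → c1 ≤ c2 + 1 →
      pvDInv d (pvRect c r1 r2 c1 (c2 + 1)) →
      (∀ l, 0 ≤ l → l < c1 → k < pvD c r1 r2 l (c2 + 1)) →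
      0 ≤ (pvShrink c r1 r2 k c2 d c1).2 ∧
      (pvShrink c r1 r2 k c2 d c1).2 ≤ c2 + 1 ∧
      pvDInv (pvShrink c r1 r2 k c2 d c1).1
        (pvRect c r1 r2 (pvShrink c r1 r2 k c2 d c1).2 (c2 + 1)) ∧
      (∀ l, 0 ≤ l → l < (pvShrink c r1 r2 k c2 d c1).2 → k < pvD c r1 r2 l (c2 + 1)) ∧
      (((pvShrink c r1 r2 k c2 d c1).1.size : Int) ≤ k ∨ (pvShrink c r1 r2 k c2 d c1).2 = c2 + 1) := by
    intro fuel
    induction fuel with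
    | zero =>
      intro c1 d hfuel h0 hle hD hP
      have hc1 : c1 = c2 + 1 := by omega
      rw [pvShrink, dif_neg (by omega)]
      exact ⟨h0, hle, hD, hP, Or.inr hc1⟩
    | succ fuel ih =>
      intro c1 d hfuel h0 hle hD hP
      by_cases hcond : k < (d.size : Int) ∧ c1 ≤ c2
      · rw [pvShrink, dif_pos hcond]
        have hsplit : pvRect c r1 r2 c1 (c2 + 1) =
            pvCol c r1 r2 c1 ++ pvRect c r1 r2 (c1 + 1) (c2 + 1) :=
          pvRect_cons c r1 r2 c1 (c2 + 1) (by omega)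
        have hD' : pvDInv (pvRemoveCol c r1 r2 c1 d) (pvRect c r1 r2 (c1 + 1) (c2 + 1)) := by
          rw [pvRemoveCol_eq]
          exact pvDInv_decList _ _ _ (by rw [← hsplit]; exact hD)
        have hsz : (d.size : Int) = pvD c r1 r2 c1 (c2 + 1) := by
          unfold pvD
          exact_mod_cast congrArg Nat.cast (pvDInv_size d _ hD)
        refine ih (c1 + 1) (pvRemoveCol c r1 r2 c1 d) (by omega) (by omega) (by omega) hD' ?_
        intro l hl0 hl
        by_cases hlc : l < c1
        · exact hP l hl0 hlc
        · have : l = c1 := by omega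
          subst this
          rw [← hsz]
          exact hcond.1
      · rw [pvShrink, dif_neg hcond]
        refine ⟨h0, hle, hD, hP, ?_⟩
        push_neg at hcond
        by_cases hk : (d.size : Int) ≤ k
        · exact Or.inl hk
        · exact Or.inr (by omega)
  exact fun c1 d => main (c2 + 1 - c1).toNat c1 d le_rfl

-- ---- A's column-loop invariant ----
def pvAInv (c : List (List Int)) (r1 r2 n k b0 j : Int)
    (st : PySem.Dict Int Int × Int × Int) : Prop :=
  0 ≤ st.2.1 ∧ st.2.1 ≤ j ∧ pvDInv st.1 (pvRect c r1 r2 st.2.1 j) ∧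
  (∀ l, 0 ≤ l → l < st.2.1 → k < pvD c r1 r2 l j) ∧
  b0 ≤ st.2.2 ∧
  (∀ l j', pvFeas c r1 r2 n k l j' → j' + 1 ≤ j → (r2 - r1 + 1) * (j' - l + 1) ≤ st.2.2) ∧
  (st.2.2 = b0 ∨ st.2.2 ≤ 0 ∨
    ∃ l j', pvFeas c r1 r2 n k l j' ∧ st.2.2 = (r2 - r1 + 1) * (j' - l + 1))

theorem pvStepA_inv (c : List (List Int)) (r1 r2 n k b0 j : Int)
    (st : PySem.Dict Int Int × Int × Int) (hr : r1 ≤ r2) (hj0 : 0 ≤ j) (hjn : j + 1 ≤ n)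
    (h : pvAInv c r1 r2 n k b0 j st) :
    pvAInv c r1 r2 n k b0 (j + 1) (pvStepA c r1 r2 k st j) := by
  obtain ⟨hc0, hcj, hD, hP, hb0, hub, hmem⟩ := h
  have hh : (1 : Int) ≤ r2 - r1 + 1 := by omega
  have hD1 : pvDInv (pvAddCol c r1 r2 j st.1) (pvRect c r1 r2 st.2.1 (j + 1)) := by
    rw [pvAddCol_eq, pvRect_succ c r1 r2 st.2.1 j hcj]
    exact pvDInv_addList _ _ _ hD
  have hP1 : ∀ l, 0 ≤ l → l < st.2.1 → k < pvD c r1 r2 l (j + 1) := by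
    intro l hl0 hl
    exact lt_of_lt_of_le (hP l hl0 hl) (pvD_mono c r1 r2 l j (by omega))
  obtain ⟨q0, qle, qD, qP, qlast⟩ :=
    pvShrink_spec c r1 r2 k j st.2.1 (pvAddCol c r1 r2 j st.1) hc0 (by omega) hD1 hP1
  set p := pvShrink c r1 r2 k j (pvAddCol c r1 r2 j st.1) st.2.1 with hp
  refine ⟨q0, qle, qD, qP, ?_, ?_, ?_⟩
  · exact le_trans hb0 (le_max_left _ _)
  · intro l j' hF hj'
    by_cases hcase : j' + 1 ≤ j
    · exact le_trans (hub l j' hF hcase) (le_max_left _ _)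
    · have hj'j : j' = j := by omega
      subst hj'j
      obtain ⟨hl0, hlj, hjn', hfk⟩ := hF
      have hlge : p.2 ≤ l := by
        by_contra hlt
        exact absurd hfk (not_le.mpr (qP l hl0 (by omega)))
      calc (r2 - r1 + 1) * (j' - l + 1) ≤ (r2 - r1 + 1) * (j' - p.2 + 1) :=
            Int.mul_le_mul_of_nonneg_left (by omega) (by omega)
        _ ≤ max st.2.2 ((r2 - r1 + 1) * (j' - p.2 + 1)) := le_max_right _ _
  · have hstep : (pvStepA c r1 r2 k st j).2.2 = max st.2.2 ((r2 - r1 + 1) * (j - p.2 + 1)) := rfl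
    rw [hstep]
    rcases max_choice st.2.2 ((r2 - r1 + 1) * (j - p.2 + 1)) with hmx | hmx
    · rw [hmx]
      rcases hmem with h1 | h1 | h1
      · exact Or.inl h1
      · exact Or.inr (Or.inl h1)
      · exact Or.inr (Or.inr h1)
    · rw [hmx]
      rcases qlast with hk | hend
      · by_cases hpj : p.2 ≤ j
        · refine Or.inr (Or.inr ⟨p.2, j, ⟨q0, hpj, hjn, ?_⟩, rfl⟩)
          have : pvD c r1 r2 p.2 (j + 1) = ((p.1.size : Nat) : Int) := by
            unfold pvD
            exact_mod_cast congrArg Nat.cast (pvDInv_size p.1 _ qD).symm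
          rw [this]
          exact_mod_cast hk
        · have : p.2 = j + 1 := by omega
          refine Or.inr (Or.inl ?_)
          rw [this]
          ring_nf
          omega
      · refine Or.inr (Or.inl ?_)
        rw [hend]
        ring_nf
        omega

theorem pvALoop (c : List (List Int)) (r1 r2 n k b0 : Int) (hr : r1 ≤ r2) :
    ∀ (fuel : Nat) (j : Int) (st : PySem.Dict Int Int × Int × Int),
    (n - j).toNat ≤ fuel → 0 ≤ j → j ≤ n → pvAInv c r1 r2 n k b0 j st →
    pvAInv c r1 r2 n k b0 n ((PySem.List.pyRange j n).foldl (pvStepA c r1 r2 k) st) := by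
  intro fuel
  induction fuel with
  | zero =>
    intro j st hfuel hj0 hjn h
    have : j = n := by omega
    subst this
    rw [PySem.List.pyRange_one_eq_nil le_rfl]
    exact h
  | succ fuel ih =>
    intro j st hfuel hj0 hjn h
    by_cases hlt : j < n
    · rw [PySem.List.pyRange_one_cons hlt, List.foldl_cons]
      exact ih (j + 1) (pvStepA c r1 r2 k st j) (by omega) (by omega) (by omega)
        (pvStepA_inv c r1 r2 n k b0 j st hr hj0 (by omega) h)
    · have : j = n := by omega
      subst this
      rw [PySem.List.pyRange_one_eq_nil le_rfl]
      exact h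

-- ---- B's inner pass (fixed left column l) ----
theorem pvBPass (c : List (List Int)) (r1 r2 n k l : Int) (hl : 0 ≤ l) :
    ∀ (fuel : Nat) (j : Int) (s : PySem.Set Int) (b : Int),
    (n - j).toNat ≤ fuel → l ≤ j → s = PySem.Set.ofList (pvRect c r1 r2 l j) →
    b ≤ ((PySem.List.pyRange j n).foldl (pvStepB c r1 r2 k l) (s, b)).2 ∧
    (∀ j', pvFeas c r1 r2 n k l j' → j ≤ j' →
      (r2 - r1 + 1) * (j' - l + 1) ≤ ((PySem.List.pyRange j n).foldl (pvStepB c r1 r2 k l) (s, b)).2) ∧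
    (((PySem.List.pyRange j n).foldl (pvStepB c r1 r2 k l) (s, b)).2 = b ∨
      ∃ j', pvFeas c r1 r2 n k l j' ∧
        ((PySem.List.pyRange j n).foldl (pvStepB c r1 r2 k l) (s, b)).2 = (r2 - r1 + 1) * (j' - l + 1)) := by
  intro fuel
  induction fuel with
  | zero =>
    intro j s b hfuel hlj hs
    have hnj : n ≤ j := by omega
    rw [PySem.List.pyRange_one_eq_nil hnj]
    refine ⟨le_rfl, ?_, Or.inl rfl⟩
    intro j' hF hjj'
    exact absurd hF.2.2.1 (by omega)
  | succ fuel ih =>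
    intro j s b hfuel hlj hs
    by_cases hlt : j < n
    · rw [PySem.List.pyRange_one_cons hlt, List.foldl_cons]
      have hs' : pvColSet c r1 r2 j s = PySem.Set.ofList (pvRect c r1 r2 l (j + 1)) := by
        rw [pvColSet_eq, hs, pvRect_succ c r1 r2 l j hlj, PySem.Set.ofList_append]
      have hlen : PySem.Set.len (pvColSet c r1 r2 j s) = pvD c r1 r2 l (j + 1) := by
        rw [hs']; rfl
      have hstep : pvStepB c r1 r2 k l (s, b) j =
          (pvColSet c r1 r2 j s,
            if PySem.Set.len (pvColSet c r1 r2 j s) ≤ k then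
              max b ((r2 - r1 + 1) * (j - l + 1)) else b) := rfl
      rw [hstep]
      set b' := if PySem.Set.len (pvColSet c r1 r2 j s) ≤ k then
          max b ((r2 - r1 + 1) * (j - l + 1)) else b with hb'
      have hbb' : b ≤ b' := by
        rw [hb']; split
        · exact le_max_left _ _
        · exact le_rfl
      obtain ⟨ih1, ih2, ih3⟩ := ih (j + 1) (pvColSet c r1 r2 j s) b' (by omega) (by omega) hs'
      refine ⟨le_trans hbb' ih1, ?_, ?_⟩
      · intro j' hF hjj'
        by_cases hje : j' = j
        · subst hje
          have hfeas : PySem.Set.len (pvColSet c r1 r2 j' s) ≤ k := by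
            rw [hlen]; exact hF.2.2.2
          have : (r2 - r1 + 1) * (j' - l + 1) ≤ b' := by
            rw [hb', if_pos hfeas]; exact le_max_right _ _
          exact le_trans this ih1
        · exact ih2 j' hF (by omega)
      · rcases ih3 with h1 | h1
        · rw [h1, hb']
          split
          · rename_i hcond
            rcases max_choice b ((r2 - r1 + 1) * (j - l + 1)) with hmx | hmx
            · exact Or.inl hmx
            · refine Or.inr ⟨j, ⟨hl, hlj, by omega, ?_⟩, hmx⟩
              rw [← hlen]; exact hcond
          · exact Or.inl rfl
        · exact Or.inr h1
    · rw [PySem.List.pyRange_one_eq_nil (by omega)]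
      refine ⟨le_rfl, ?_, Or.inl rfl⟩
      intro j' hF hjj'
      exact absurd hF.2.2.1 (by omega)

-- ---- the two inner computations agree on every row pair ----
theorem pvInner_eq (c : List (List Int)) (r1 r2 n k b0 : Int) (hr : r1 ≤ r2) (hb : 0 ≤ b0) :
    ((PySem.List.pyRange 0 n).foldl (pvStepA c r1 r2 k) (PySem.Dict.empty, 0, b0)).2.2 =
      (PySem.List.pyRange 0 n).foldl (fun b l =>
        ((PySem.List.pyRange l n).foldl (pvStepB c r1 r2 k l) (PySem.Set.empty, b)).2) b0 ∧
    b0 ≤ ((PySem.List.pyRange 0 n).foldl (pvStepA c r1 r2 k) (PySem.Dict.empty, 0, b0)).2.2 := by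
  by_cases hn : n ≤ 0
  · rw [PySem.List.pyRange_one_eq_nil hn]
    exact ⟨rfl, le_rfl⟩
  push_neg at hn
  -- A side
  have hInit : pvAInv c r1 r2 n k b0 0 (PySem.Dict.empty, 0, b0) := by
    refine ⟨le_rfl, le_rfl, ?_, ?_, le_rfl, ?_, Or.inl rfl⟩
    · rw [pvRect_nil c r1 r2 0 0 le_rfl]
      exact pvDInv_empty
    · intro l hl0 hl
      simp only [] at hl
      norm_num at hl
      omega
    · intro l j' hF hj'
      have := hF.1
      have := hF.2.1
      omega
  have hA := pvALoop c r1 r2 n k b0 hr (n - 0).toNat 0 (PySem.Dict.empty, 0, b0)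
    le_rfl le_rfl (by omega) hInit
  obtain ⟨-, -, -, -, hb0A, ubA, memA⟩ := hA
  set A := ((PySem.List.pyRange 0 n).foldl (pvStepA c r1 r2 k) (PySem.Dict.empty, 0, b0)).2.2 with hAdef
  -- B side facts
  have hpass : ∀ (l : Int), 0 ≤ l → ∀ b,
      b ≤ ((PySem.List.pyRange l n).foldl (pvStepB c r1 r2 k l) (PySem.Set.empty, b)).2 ∧
      (∀ j', pvFeas c r1 r2 n k l j' →
        (r2 - r1 + 1) * (j' - l + 1) ≤ ((PySem.List.pyRange l n).foldl (pvStepB c r1 r2 k l) (PySem.Set.empty, b)).2) ∧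
      (((PySem.List.pyRange l n).foldl (pvStepB c r1 r2 k l) (PySem.Set.empty, b)).2 = b ∨
        ∃ j', pvFeas c r1 r2 n k l j' ∧
          ((PySem.List.pyRange l n).foldl (pvStepB c r1 r2 k l) (PySem.Set.empty, b)).2 = (r2 - r1 + 1) * (j' - l + 1)) := by
    intro l hl0 b
    have hs : (PySem.Set.empty : PySem.Set Int) = PySem.Set.ofList (pvRect c r1 r2 l l) := by
      rw [pvRect_nil c r1 r2 l l le_rfl, PySem.Set.ofList_nil]
      rfl
    obtain ⟨h1, h2, h3⟩ := pvBPass c r1 r2 n k l hl0 (n - l).toNat l PySem.Set.empty b le_rfl le_rfl hs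
    exact ⟨h1, fun j' hF => h2 j' hF hF.2.1, h3⟩
  set g := fun b l => ((PySem.List.pyRange l n).foldl (pvStepB c r1 r2 k l) (PySem.Set.empty, b)).2 with hg
  have hmonoB : ∀ b l, l ∈ PySem.List.pyRange 0 n → b ≤ g b l := by
    intro b l hlmem
    exact (hpass l (PySem.List.mem_pyRange_one.mp hlmem).1 b).1
  set B := (PySem.List.pyRange 0 n).foldl g b0 with hBdef
  have hb0B : b0 ≤ B := pvFoldl_ge g _ b0 hmonoB
  have ubB : ∀ l j', pvFeas c r1 r2 n k l j' → (r2 - r1 + 1) * (j' - l + 1) ≤ B := by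
    intro l j' hF
    have hlmem : l ∈ PySem.List.pyRange 0 n := by
      rw [PySem.List.mem_pyRange_one]
      obtain ⟨h1, h2, h3, -⟩ := hF
      omega
    exact pvFoldl_reach g _ l _ b0 hlmem hmonoB (fun b => (hpass l hF.1 b).2.1 j' hF)
  have memB : B = b0 ∨ ∃ l j', pvFeas c r1 r2 n k l j' ∧ B = (r2 - r1 + 1) * (j' - l + 1) := by
    refine pvFoldl_mem_or (fun v => ∃ l j', pvFeas c r1 r2 n k l j' ∧ v = (r2 - r1 + 1) * (j' - l + 1)) g _ b0 ?_
    intro b l hlmem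
    rcases (hpass l (PySem.List.mem_pyRange_one.mp hlmem).1 b).2.2 with h1 | ⟨j', hF, h1⟩
    · exact Or.inl h1
    · exact Or.inr ⟨l, j', hF, h1⟩
  refine ⟨le_antisymm ?_ ?_, hb0A⟩
  · rcases memA with h1 | h1 | ⟨l, j', hF, h1⟩
    · rw [h1]; exact hb0B
    · exact le_trans h1 (le_trans hb hb0B)
    · rw [h1]; exact ubB l j' hF
  · rcases memB with h1 | ⟨l, j', hF, h1⟩
    · rw [h1]; exact hb0A
    · rw [h1]; exact ubA l j' hF hF.2.2.1

-- ===== VERDICT (by name: the statement is the Claim_ definition above) =====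
theorem max_distinct_rectangle_spec : Claim_equal_max_distinct_rectangle := by
  unfold Claim_equal_max_distinct_rectangle
  intro m n k c _ _
  unfold Spec_max_distinct_rectangle max_distinct_rectangle max_distinct_rectangle_alt
  refine (pvFoldl_congr_inv (fun b => 0 ≤ b) _ _ (PySem.List.pyRange 0 m) 0 le_rfl ?_).1
  intro b r1 hr1 hb
  refine pvFoldl_congr_inv (fun b => 0 ≤ b) _ _ (PySem.List.pyRange r1 m) b hb ?_
  intro b' r2 hr2 hb'
  have hr : r1 ≤ r2 := (PySem.List.mem_pyRange_one.mp hr2).1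
  obtain ⟨heq, hge⟩ := pvInner_eq c r1 r2 n k b' hr hb'
  exact ⟨heq, le_trans hb' hge⟩
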